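-- pv_equiv track=rewrite | github.com/zingzheng/LeetCode_py | 42Trapping Rain Water.py | findRight
-- ===== SOURCE A (Python) =====
-- def findRight(nums,i):
--     if len(nums)-i <=1:
--         return 0,0
--     ##return the first whilch bigger than nums[i]
--     for index in range(i+1,len(nums)):
--         if nums[index]>nums[i]:
--             return nums[index],index
--     ##no num bigger than nums[i],return the biggest
--     max_right = max(nums[i+1::])
--     return max_right,nums[i+1::].index(max_right)+i+1
-- ===== SOURCE B (Python) =====
-- def findRight(nums, i):
--     if len(nums) - i <= 1:
--         return 0, 0
--     # single pass: early-return the first element bigger than nums[i],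
--     # otherwise track the first-occurring running maximum of the tail
--     best_val, best_idx = nums[i + 1], i + 1
--     for index in range(i + 1, len(nums)):
--         if nums[index] > nums[i]:
--             return nums[index], index
--         if nums[index] > best_val:
--             best_val, best_idx = nums[index], index
--     return best_val, best_idx
-- ===== Notes on version B (the rewrite author's own statement) =====
-- stated objective: alternative
-- what changed: B replaces A's two trailing scans of the tail (max() followed by .index()) with a single search loop that simultaneously maintains the first-occurring running maximum, returning it if no strictly bigger element appears.
-- outside the precondition, e.g. on findRight([5, 1, 2], -3): A returns (2, -1), B returns (5, 0)
import Mathlib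
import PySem

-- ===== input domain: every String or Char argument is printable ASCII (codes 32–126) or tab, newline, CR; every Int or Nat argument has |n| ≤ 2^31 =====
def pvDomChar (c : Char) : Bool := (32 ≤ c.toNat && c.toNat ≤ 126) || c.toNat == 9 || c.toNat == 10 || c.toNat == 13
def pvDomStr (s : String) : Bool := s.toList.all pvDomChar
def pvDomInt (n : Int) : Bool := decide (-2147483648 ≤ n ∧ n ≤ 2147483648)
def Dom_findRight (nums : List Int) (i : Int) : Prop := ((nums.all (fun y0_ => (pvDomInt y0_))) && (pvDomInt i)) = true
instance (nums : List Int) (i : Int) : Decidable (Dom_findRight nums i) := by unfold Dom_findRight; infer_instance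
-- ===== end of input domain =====

-- B replaces A's two trailing scans (max() then .index()) with one loop that also maintains the
-- first-occurring running maximum alongside the early-exit search; objective: alternative decomposition.


-- ===== PORT A =====
-- the 'for index in range(i+1, len(nums))' search loop of A
def findRightScan (nums : List Int) (piv : Int) : List Int → Option (Int × Int)
  | [] => none
  | idx :: rest =>
    if PySem.List.pyGetD nums idx 0 > piv then some (PySem.List.pyGetD nums idx 0, idx)
    else findRightScan nums piv rest

def findRight (nums : List Int) (i : Int) : Int × Int :=
  if PySem.List.len nums - i ≤ 1 then (0, 0)
  else
    match findRightScan nums (PySem.List.pyGetD nums i 0) (PySem.List.pyRange (i + 1) (PySem.List.len nums) 1) with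
    | some r => r
    | none =>
      let tail := PySem.List.slice nums (some (i + 1)) none
      match PySem.List.max? tail (fun x => x) with
      | some m => (m, (((PySem.List.index? tail m).getD 0 : Nat) : Int) + i + 1)
      | none => (0, 0)   -- unreachable under Pre_: Python's max() of an empty slice raises

-- ===== PORT B =====
-- B's single loop: early-return on the first element > piv, else keep the first running maximum
def findRightAltScan (nums : List Int) (piv bv bi : Int) : List Int → Int × Int
  | [] => (bv, bi)
  | idx :: rest =>
    let v := PySem.List.pyGetD nums idx 0
    if v > piv then (v, idx)
    else if v > bv then findRightAltScan nums piv v idx rest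
    else findRightAltScan nums piv bv bi rest

def findRight_alt (nums : List Int) (i : Int) : Int × Int :=
  if PySem.List.len nums - i ≤ 1 then (0, 0)
  else
    findRightAltScan nums (PySem.List.pyGetD nums i 0) (PySem.List.pyGetD nums (i + 1) 0) (i + 1)
      (PySem.List.pyRange (i + 1) (PySem.List.len nums) 1)

-- ===== PRECONDITION & SPEC =====
-- Pre_ excludes negative i, outside the function's natural domain: there Python's negative-index
-- wraparound yields accidental values (or an IndexError when i < -len(nums)).
def Pre_findRight (nums : List Int) (i : Int) : Prop := 0 ≤ i
instance (nums : List Int) (i : Int) : Decidable (Pre_findRight nums i) := by unfold Pre_findRight; infer_instance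
def pvWitness_findRight : List Int × Int := ([3, 1, 2], 0)

def Spec_findRight (nums : List Int) (i : Int) (out : Int × Int) : Prop := out = findRight_alt nums i
instance (nums : List Int) (i : Int) (out : Int × Int) : Decidable (Spec_findRight nums i out) := by unfold Spec_findRight; infer_instance

-- ===== CLAIM (what is proved, stated in full; the proofs are below) =====
def Claim_equal_findRight : Prop := ∀ (nums : List Int) (i : Int), Dom_findRight nums i → Pre_findRight nums i → Spec_findRight nums i (findRight nums i)

-- ===== LEMMAS AND PROOFS =====

-- first maximum with its index, as a structural recursion over (value, index) pairs
def fm : List (Int × Int) → Option (Int × Int)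
  | [] => none
  | (v, j) :: rest =>
    match fm rest with
    | none => some (v, j)
    | some (m, k) => if m > v then some (m, k) else some (v, j)

lemma fm_mem : ∀ (ps : List (Int × Int)) (r : Int × Int), fm ps = some r → r ∈ ps := by
  intro ps
  induction ps with
  | nil => intro r h; simp [fm] at h
  | cons p rest ih =>
    intro r h
    obtain ⟨v, j⟩ := p
    simp only [fm] at h
    cases hrest : fm rest with
    | none => rw [hrest] at h; simp at h; simp [h]
    | some mk =>
      obtain ⟨m, k⟩ := mk
      rw [hrest] at h
      have h' : (if m > v then some (m, k) else some (v, j)) = some r := h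
      by_cases hmv : m > v
      · rw [if_pos hmv] at h'
        simp at h'
        right; exact h' ▸ ih _ hrest
      · rw [if_neg hmv] at h'
        simp at h'; simp [h']

-- fm finds the first position of the maximum
lemma fm_first_max : ∀ (ps : List (Int × Int)) (k : Nat) (m : Int) (hk : k < ps.length),
    ps[k].1 = m → (∀ l (hl : l < ps.length), l < k → ps[l].1 ≠ m) → (∀ q ∈ ps, q.1 ≤ m) →
    fm ps = some (m, ps[k].2) := by
  intro ps
  induction ps with
  | nil => intro k m hk; simp at hk
  | cons p rest ih =>
    intro k m hk hval hfirst hmax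
    obtain ⟨v, j⟩ := p
    cases k with
    | zero =>
      simp at hval
      subst hval
      simp only [fm]
      cases hrest : fm rest with
      | none => simp
      | some mk =>
        obtain ⟨m', k'⟩ := mk
        have hmem := fm_mem rest (m', k') hrest
        have : m' ≤ v := hmax (m', k') (List.mem_cons_of_mem _ hmem)
        simp [show ¬ m' > v by omega]
    | succ l =>
      have hvlt : v < m := by
        have h0 := hfirst 0 (by omega) (by omega)
        simp at h0
        have : v ≤ m := hmax (v, j) List.mem_cons_self
        omega
      have hrec := ih l m (by simpa using hk) (by simpa using hval)
        (fun l' hl' hlk => by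
          have := hfirst (l' + 1) (by simpa using hl') (by omega)
          simpa using this)
        (fun q hq => hmax q (List.mem_cons_of_mem _ hq))
      simp only [fm, hrec]
      simp [show m > v by omega]

-- the loop correspondence: with accumulator bv ≤ piv, B's scan equals A's scan when A's exits
-- early, and otherwise the first maximum of the remaining pairs folded into the accumulator
lemma scan_eq (nums : List Int) (piv : Int) :
    ∀ (idxs : List Int) (bv bi : Int), bv ≤ piv →
    findRightAltScan nums piv bv bi idxs =
      (match findRightScan nums piv idxs with
       | some r => r
       | none =>
         match fm (idxs.map (fun j => (PySem.List.pyGetD nums j 0, j))) with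
         | none => (bv, bi)
         | some (m, k) => if m > bv then (m, k) else (bv, bi)) := by
  intro idxs
  induction idxs with
  | nil => intro bv bi _; simp [findRightAltScan, findRightScan, fm]
  | cons idx rest ih =>
    intro bv bi hbv
    set v := PySem.List.pyGetD nums idx 0 with hv
    by_cases hpiv : v > piv
    · simp [findRightAltScan, findRightScan, ← hv, hpiv]
    · have hstepA : findRightScan nums piv (idx :: rest) = findRightScan nums piv rest := by
        simp [findRightScan, ← hv, hpiv]
      rw [hstepA, List.map_cons]
      by_cases hvbv : v > bv
      · have hstep : findRightAltScan nums piv bv bi (idx :: rest) = findRightAltScan nums piv v idx rest := by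
          simp [findRightAltScan, ← hv, hpiv, hvbv]
        rw [hstep, ih v idx (by omega)]
        cases hA : findRightScan nums piv rest with
        | some r => simp
        | none =>
          simp only [fm]
          cases hfm : fm (rest.map (fun j => (PySem.List.pyGetD nums j 0, j))) with
          | none => simp [← hv, hvbv]
          | some mk =>
            obtain ⟨m, k⟩ := mk
            by_cases hmv : m > v
            · simp [← hv, hmv, show m > bv by omega]
            · simp [← hv, hmv, hvbv]
      · have hstep : findRightAltScan nums piv bv bi (idx :: rest) = findRightAltScan nums piv bv bi rest := by
          simp [findRightAltScan, ← hv, hpiv, hvbv]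
        rw [hstep, ih bv bi hbv]
        cases hA : findRightScan nums piv rest with
        | some r => simp
        | none =>
          simp only [fm]
          cases hfm : fm (rest.map (fun j => (PySem.List.pyGetD nums j 0, j))) with
          | none => simp [← hv, hvbv]
          | some mk =>
            obtain ⟨m, k⟩ := mk
            by_cases hmv : m > v
            · simp [← hv, hmv]
            · simp [← hv, hmv, hvbv, show ¬ m > bv by omega]

-- ===== VERDICT (by name: the statement is the Claim_ definition above) =====
theorem findRight_spec : Claim_equal_findRight := by
  intro nums i _ hpre
  have h0i : 0 ≤ i := hpre
  unfold Spec_findRight findRight findRight_alt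
  by_cases hguard : PySem.List.len nums - i ≤ 1
  · rw [if_pos hguard, if_pos hguard]
  · rw [if_neg hguard, if_neg hguard]
    have hlen : i + 1 < (nums.length : Int) := by
      simp only [PySem.List.len_eq] at hguard; omega
    set piv := PySem.List.pyGetD nums i 0 with hpivdef
    set v0 := PySem.List.pyGetD nums (i + 1) 0 with hv0def
    have hrcons : PySem.List.pyRange (i + 1) (PySem.List.len nums) 1
        = (i + 1) :: PySem.List.pyRange (i + 1 + 1) (PySem.List.len nums) 1 :=
      PySem.List.pyRange_one_cons (by simp only [PySem.List.len_eq]; omega)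
    set rest := PySem.List.pyRange (i + 1 + 1) (PySem.List.len nums) 1 with hrest
    rw [hrcons]
    by_cases hv0p : v0 > piv
    · simp [findRightScan, findRightAltScan, ← hv0def, hv0p]
    · have hstepA : findRightScan nums piv ((i + 1) :: rest) = findRightScan nums piv rest := by
        simp [findRightScan, ← hv0def, hv0p]
      have hstepB : findRightAltScan nums piv v0 (i + 1) ((i + 1) :: rest) = findRightAltScan nums piv v0 (i + 1) rest := by
        simp [findRightAltScan, ← hv0def, hv0p]
      rw [hstepA, hstepB, scan_eq nums piv rest v0 (i + 1) (by omega)]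
      cases hA : findRightScan nums piv rest with
      | some r => rfl
      | none =>
        -- A's fallback: max of the slice and the first index of that max
        set idxs := PySem.List.pyRange (i + 1) (PySem.List.len nums) 1 with hidxs
        set g := fun j => PySem.List.pyGetD nums j 0 with hg
        set tail := PySem.List.slice nums (some (i + 1)) (none : Option Int) with htaildef
        have htail : tail = idxs.map g := by
          rw [htaildef, hidxs, hg,
            PySem.List.map_pyGetD_pyRange nums 0 (a := i + 1) (by omega)]
          exact PySem.List.slice_from nums (by omega)
        have hlentail : tail.length = ((nums.length : Int) - (i + 1)).toNat := by
          rw [htail, List.length_map, hidxs, PySem.List.length_pyRange_one]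
          simp only [PySem.List.len_eq]
        have htne : tail ≠ [] := by
          intro hnil
          rw [hnil] at hlentail
          simp at hlentail
          omega
        obtain ⟨m, hm⟩ : ∃ m, PySem.List.max? tail (fun x => x) = some m := by
          cases hmx : PySem.List.max? tail (fun x => x) with
          | none => exact absurd ((PySem.List.max?_eq_none_iff tail (fun x => x)).mp hmx) htne
          | some m => exact ⟨m, rfl⟩
        have hmmem : m ∈ tail := PySem.List.max?_mem hm
        obtain ⟨k, hk⟩ : ∃ k, PySem.List.index? tail m = some k := by
          cases hix : PySem.List.index? tail m with
          | none =>
            rw [PySem.List.index?_eq_none_iff] at hix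
            exact absurd hmmem hix
          | some k => exact ⟨k, rfl⟩
        obtain ⟨hklen, hkval, hkfirst⟩ := PySem.List.getElem_of_index?_eq_some hk
        have hmax : ∀ y ∈ tail, y ≤ m := fun y hy => PySem.List.max?_isMax hm y hy
        -- the full pair list and its fm
        set ps := idxs.map (fun j => (g j, j)) with hps
        have hpslen : ps.length = tail.length := by
          rw [hps, htail, List.length_map, List.length_map]
        have hkps : k < ps.length := by omega
        have hps1 : ∀ (l : Nat) (hl : l < ps.length), ps[l].1 = tail[l]'(by omega) := by
          intro l hl
          simp [hps, htail]
        have hps2 : ∀ (l : Nat) (hl : l < ps.length), ps[l].2 = (i + 1) + l := by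
          intro l hl
          simp [hps, hidxs, PySem.List.getElem_pyRange_one]
        have hfmfull : fm ps = some (m, ps[k].2) := by
          apply fm_first_max ps k m hkps
          · rw [hps1 k hkps]; exact hkval
          · intro l hl hlk
            rw [hps1 l hl]
            exact hkfirst l hlk
          · intro q hq
            rw [hps] at hq
            obtain ⟨j, hj, hqeq⟩ := List.mem_map.mp hq
            have hmem : g j ∈ tail := by
              rw [htail]; exact List.mem_map.mpr ⟨j, hj, rfl⟩
            have := hmax _ hmem
            simpa [← hqeq] using this
        -- fm on the full list is the head step over fm of the rest
        have hcons : ps = (v0, i + 1) :: rest.map (fun j => (g j, j)) := by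
          rw [hps, hrcons, List.map_cons]
        -- reduce both sides
        simp only [hm, hk, Option.getD_some]
        have hk2 : ps[k].2 = (i + 1) + (k : Int) := hps2 k hkps
        rw [hk2, hcons] at hfmfull
        simp only [fm, hg] at hfmfull
        cases hfm : fm (rest.map (fun j => (PySem.List.pyGetD nums j 0, j))) with
        | none =>
          rw [hfm] at hfmfull
          simp at hfmfull
          obtain ⟨hm1, hm2⟩ := hfmfull
          have : ((k : Int)) = 0 := by omega
          refine Prod.ext ?_ ?_
          · simpa using hm1.symm
          · simp only []
            omega
        | some mk =>
          obtain ⟨m', k'⟩ := mk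
          rw [hfm] at hfmfull
          have h2 : (if m' > v0 then some (m', k') else some ((v0 : Int), i + 1)) = some (m, i + 1 + (k : Int)) := hfmfull
          by_cases hm'v : m' > v0
          · rw [if_pos hm'v] at h2
            simp at h2
            obtain ⟨hm1, hm2⟩ := h2
            simp only [Option.getD_some, if_pos (show m' > v0 from hm'v)]
            refine Prod.ext ?_ ?_
            · simpa using hm1.symm
            · simp only []
              omega
          · rw [if_neg hm'v] at h2
            simp at h2
            obtain ⟨hm1, hm2⟩ := h2
            simp only [Option.getD_some, if_neg (show ¬ m' > v0 from hm'v)]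
            refine Prod.ext ?_ ?_
            · simpa using hm1.symm
            · simp only []
              omega
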